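-- pv_equiv track=rewrite | github.com/Omielee/Leetcode_Practice | test.py | max_solar_bulbs_sliding_window
-- ===== SOURCE A (Python) =====
-- def max_solar_bulbs_sliding_window(bulb_sequence):
--     # Add a '0' at the beginning and at the end of the sequence
--     bulbs = ['0'] + list(bulb_sequence) + ['0']
--     length = len(bulbs)
--
--     # Use a sliding window of size 3 to find consecutive '0's and replace the middle one
--     for i in range(1, length - 1):  # Start from 1 and end at length - 1 because of the added '0's
--         if bulbs[i-1] == '0' and bulbs[i] == '0' and bulbs[i+1] == '0':
--             bulbs[i] = '1'
--
--     # Remove the added '0's at the beginning and the end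
--     bulbs = bulbs[1:-1]
--
--     # Count the number of '1's in the final sequence
--     return bulbs.count('1')
-- ===== SOURCE B (Python) =====
-- def max_solar_bulbs_sliding_window(bulb_sequence):
--     # Run-length reformulation: existing '1's plus floor((L-1)/2) new bulbs for each
--     # maximal run of L consecutive '0's in the sequence padded with one '0' at each end.
--     total = bulb_sequence.count('1')
--     run = 1  # virtual leading '0' pad
--     for x in bulb_sequence:
--         if x == '0':
--             run += 1
--         else:
--             total += max(run - 1, 0) // 2
--             run = 0
--     return total + run // 2  # trailing pad: ((run + 1) - 1) // 2
-- ===== Notes on version B (the rewrite author's own statement) =====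
-- stated objective: alternative
-- what changed: Replaces A's build-padded-copy, mutate-in-place greedy sliding window and final slice+count with a single pass that counts existing '1's and run-lengths of consecutive '0's, adding the closed form floor((L-1)/2) per padded zero-run.
import Mathlib
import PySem

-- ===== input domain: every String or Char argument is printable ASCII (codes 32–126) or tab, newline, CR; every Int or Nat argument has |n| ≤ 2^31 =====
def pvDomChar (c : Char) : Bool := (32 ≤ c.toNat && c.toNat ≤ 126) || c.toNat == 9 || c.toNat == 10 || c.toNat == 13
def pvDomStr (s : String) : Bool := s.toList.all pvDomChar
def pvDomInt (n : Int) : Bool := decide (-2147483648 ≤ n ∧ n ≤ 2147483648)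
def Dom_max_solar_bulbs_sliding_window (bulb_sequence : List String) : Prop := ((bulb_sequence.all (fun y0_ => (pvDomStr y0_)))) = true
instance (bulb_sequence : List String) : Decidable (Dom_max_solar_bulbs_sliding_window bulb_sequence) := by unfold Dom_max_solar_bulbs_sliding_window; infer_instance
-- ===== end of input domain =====

-- B replaces A's in-place greedy sliding-window flipping with a one-pass zero-run-length
-- scan using the closed form floor((L-1)/2) per padded run (alternative decomposition, same cost).

-- ===== PORT A =====
-- loop body of A's 'for i in range(1, length-1)' (reads bulbs[i-1], bulbs[i], bulbs[i+1], may set bulbs[i])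
def pvAStep (bs : List String) (i : Int) : List String :=
  if PySem.List.pyGet? bs (i - 1) = some "0" ∧ PySem.List.pyGet? bs i = some "0" ∧
      PySem.List.pyGet? bs (i + 1) = some "0"
  then PySem.List.pySetD bs i "1"   -- bulbs[i] = '1' (index always in range here)
  else bs

def max_solar_bulbs_sliding_window (bulb_sequence : List String) : Int :=
  let bulbs := ["0"] ++ bulb_sequence ++ ["0"]
  let length : Int := bulbs.length
  let bulbs := (PySem.List.pyRange 1 (length - 1) 1).foldl pvAStep bulbs
  let bulbs := PySem.List.slice bulbs (some 1) (some (-1))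
  (PySem.List.count bulbs "1" : Int)

-- ===== PORT B =====
-- loop body of B's 'for x in bulb_sequence' over the state (total, run)
def pvBStep (tr : Int × Int) (x : String) : Int × Int :=
  if x = "0" then (tr.1, tr.2 + 1)
  else (tr.1 + PySem.Int.floordiv (max (tr.2 - 1) 0) 2, 0)

def max_solar_bulbs_sliding_window_alt (bulb_sequence : List String) : Int :=
  let total : Int := PySem.List.count bulb_sequence "1"
  let p := bulb_sequence.foldl pvBStep (total, 1)
  p.1 + PySem.Int.floordiv p.2 2

-- ===== PRECONDITION & SPEC =====
def Spec_max_solar_bulbs_sliding_window (bulb_sequence : List String) (out : Int) : Prop := out = max_solar_bulbs_sliding_window_alt bulb_sequence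
instance (bulb_sequence : List String) (out : Int) : Decidable (Spec_max_solar_bulbs_sliding_window bulb_sequence out) := by unfold Spec_max_solar_bulbs_sliding_window; infer_instance

-- ===== CLAIM (what is proved, stated in full; the proofs are below) =====
def Claim_equal_max_solar_bulbs_sliding_window : Prop := ∀ (bulb_sequence : List String), Dom_max_solar_bulbs_sliding_window bulb_sequence → Spec_max_solar_bulbs_sliding_window bulb_sequence (max_solar_bulbs_sliding_window bulb_sequence)

-- ===== LEMMAS AND PROOFS =====

-- Pure form of A's mutating loop: 'prev' is the already-processed left neighbour; the final
-- element (the trailing pad) is never processed.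
def pvScan : String → List String → List String
  | _, [] => []
  | _, [x] => [x]
  | prev, x :: y :: t =>
    if prev = "0" ∧ x = "0" ∧ y = "0" then "1" :: pvScan "1" (y :: t)
    else x :: pvScan x (y :: t)

-- Count of '1's in A's processed interior, computed directly on the unpadded list.
def pvCnt : String → List String → Int
  | _, [] => 0
  | prev, [x] => if prev = "0" ∧ x = "0" then 1 else if x = "1" then 1 else 0
  | prev, x :: y :: t =>
    if prev = "0" ∧ x = "0" ∧ y = "0" then 1 + pvCnt "1" (y :: t)
    else (if x = "1" then 1 else 0) + pvCnt x (y :: t)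

lemma pvCnt_cons (prev x : String) (t : List String) :
    pvCnt prev (x :: t) =
      if prev = "0" ∧ x = "0" ∧ t.headD "0" = "0" then 1 + pvCnt "1" t
      else (if x = "1" then 1 else 0) + pvCnt x t := by
  cases t with
  | nil =>
    by_cases h1 : prev = "0" <;> by_cases h2 : x = "0" <;>
      simp [pvCnt, h1, h2]
  | cons y t' => simp [pvCnt]

lemma pvScan_length : ∀ (prev : String) (l : List String), (pvScan prev l).length = l.length := by
  intro prev l
  induction l generalizing prev with
  | nil => simp [pvScan]
  | cons x t ih =>
    cases t with
    | nil => simp [pvScan]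
    | cons y t' =>
      simp only [pvScan]
      split <;> simp [ih]

lemma pvScan_cons_pad (prev x : String) (t : List String) :
    pvScan prev (x :: (t ++ ["0"])) =
      if prev = "0" ∧ x = "0" ∧ t.headD "0" = "0" then "1" :: pvScan "1" (t ++ ["0"])
      else x :: pvScan x (t ++ ["0"]) := by
  cases t with
  | nil => simp [pvScan]
  | cons y t' => simp [pvScan]

lemma pvSet_append (done : List String) (x v : String) (r : List String) :
    (done ++ x :: r).set done.length v = done ++ v :: r := by
  induction done with
  | nil => simp
  | cons d ds ih => simp [ih]

lemma pvGetLast_prefix (done : List String) (h : done ≠ []) (r : List String) :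
    PySem.List.pyGet? (done ++ r) ((done.length : Int) - 1) = some (done.getLast h) := by
  have hlen : 1 ≤ done.length := List.length_pos_of_ne_nil h
  have hc : ((done.length : Int) - 1) = ((done.length - 1 : Nat) : Int) := by omega
  rw [hc, PySem.List.pyGet?_natCast]
  rw [List.getElem?_append_left (by omega)]
  rw [List.getLast_eq_getElem]
  simp

lemma pvFold_eq_scan : ∀ (rest done : List String) (h : done ≠ []),
    (PySem.List.pyRange (done.length) ((done.length : Int) + (rest.length : Int)) 1).foldl pvAStep
        (done ++ rest ++ ["0"])
      = done ++ pvScan (done.getLast h) (rest ++ ["0"]) := by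
  intro rest
  induction rest with
  | nil =>
    intro done h
    rw [PySem.List.pyRange_one_eq_nil (by simp)]
    simp [pvScan]
  | cons x t ih =>
    intro done h
    have hlen : 1 ≤ done.length := List.length_pos_of_ne_nil h
    rw [PySem.List.pyRange_one_cons (by push_cast [List.length_cons]; omega)]
    simp only [List.foldl_cons]
    have hget0 : PySem.List.pyGet? (done ++ (x :: t) ++ ["0"]) ((done.length : Int) - 1)
        = some (done.getLast h) := by
      rw [List.append_assoc]; exact pvGetLast_prefix done h _
    have hget1 : PySem.List.pyGet? (done ++ (x :: t) ++ ["0"]) (done.length) = some x := by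
      rw [List.append_assoc, List.cons_append]
      exact PySem.List.pyGet?_append_length done _ x
    have hget2 : PySem.List.pyGet? (done ++ (x :: t) ++ ["0"]) ((done.length : Int) + 1)
        = some (t.headD "0") := by
      rw [List.append_assoc, List.cons_append]
      have hc : ((done.length : Int) + 1) = ((done.length + 1 : Nat) : Int) := by omega
      rw [hc, PySem.List.pyGet?_natCast]
      rw [List.getElem?_append_right (by simp)]
      cases t <;> simp
    by_cases hcond : done.getLast h = "0" ∧ x = "0" ∧ t.headD "0" = "0"
    · have hstep : pvAStep (done ++ (x :: t) ++ ["0"]) (done.length)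
          = (done ++ ["1"]) ++ t ++ ["0"] := by
        simp only [pvAStep, hget0, hget1, hget2, Option.some.injEq]
        rw [if_pos hcond]
        rw [PySem.List.pySetD_natCast]
        rw [List.append_assoc, List.cons_append, pvSet_append]
        simp
      rw [hstep]
      have hne : (done ++ ["1"]) ≠ [] := by simp
      have hrange : PySem.List.pyRange ((done.length : Int) + 1) ((done.length : Int) + ((x :: t).length : Int)) 1
          = PySem.List.pyRange (((done ++ ["1"]).length : Int)) (((done ++ ["1"]).length : Int) + (t.length : Int)) 1 := by
        congr 1 <;> push_cast <;> simp <;> omega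
      rw [hrange, ih (done ++ ["1"]) hne]
      have hlast : (done ++ ["1"]).getLast hne = "1" := List.getLast_append_singleton _
      rw [hlast]
      simp only [List.cons_append]
      rw [pvScan_cons_pad, if_pos hcond]
      simp
    · have hstep : pvAStep (done ++ (x :: t) ++ ["0"]) (done.length)
          = (done ++ [x]) ++ t ++ ["0"] := by
        simp only [pvAStep, hget0, hget1, hget2, Option.some.injEq]
        rw [if_neg hcond]
        simp
      rw [hstep]
      have hne : (done ++ [x]) ≠ [] := by simp
      have hrange : PySem.List.pyRange ((done.length : Int) + 1) ((done.length : Int) + ((x :: t).length : Int)) 1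
          = PySem.List.pyRange (((done ++ [x]).length : Int)) (((done ++ [x]).length : Int) + (t.length : Int)) 1 := by
        congr 1 <;> push_cast <;> simp <;> omega
      rw [hrange, ih (done ++ [x]) hne]
      have hlast : (done ++ [x]).getLast hne = x := List.getLast_append_singleton _
      rw [hlast]
      simp only [List.cons_append]
      rw [pvScan_cons_pad, if_neg hcond]
      simp

lemma pvCnt_eq_count_scan : ∀ (l : List String) (prev : String),
    pvCnt prev l = ((pvScan prev (l ++ ["0"])).dropLast.count "1" : Int) := by
  intro l
  induction l with
  | nil => intro prev; simp [pvCnt, pvScan]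
  | cons x t ih =>
    intro prev
    have hlenx : ∀ p : String, (pvScan p (t ++ ["0"])).length = t.length + 1 := by
      intro p; simp [pvScan_length]
    rw [pvCnt_cons, List.cons_append, pvScan_cons_pad]
    by_cases hc : prev = "0" ∧ x = "0" ∧ t.headD "0" = "0"
    · rw [if_pos hc, if_pos hc]
      have hne : pvScan "1" (t ++ ["0"]) ≠ [] := by
        intro hnil; have := hlenx "1"; rw [hnil] at this; simp at this
      rw [List.dropLast_cons_of_ne_nil hne, List.count_cons, ih "1"]
      push_cast
      simp
      omega
    · rw [if_neg hc, if_neg hc]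
      have hne : pvScan x (t ++ ["0"]) ≠ [] := by
        intro hnil; have := hlenx x; rw [hnil] at this; simp at this
      rw [List.dropLast_cons_of_ne_nil hne, List.count_cons, ih x]
      by_cases hx1 : x = "1" <;> simp [hx1] <;> omega

-- additivity of the total component of B's fold
lemma pvBFold_add : ∀ (l : List String) (a t r : Int),
    l.foldl pvBStep (a + t, r) = ((l.foldl pvBStep (t, r)).1 + a, (l.foldl pvBStep (t, r)).2) := by
  intro l
  induction l with
  | nil => intro a t r; simp [add_comm]
  | cons x xs ih =>
    intro a t r
    by_cases hx : x = "0"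
    · simp only [List.foldl_cons, pvBStep, hx, if_true]
      exact ih a t (r + 1)
    · simp only [List.foldl_cons, pvBStep, if_neg hx]
      rw [show a + t + PySem.Int.floordiv (max (r - 1) 0) 2
            = a + (t + PySem.Int.floordiv (max (r - 1) 0) 2) by ring]
      exact ih a (t + PySem.Int.floordiv (max (r - 1) 0) 2) 0

-- B's value when the fold is started at total 0 and run r
def pvG (r : Int) (l : List String) : Int :=
  (l.count "1" : Int) + ((l.foldl pvBStep (0, r)).1 + PySem.Int.floordiv (l.foldl pvBStep (0, r)).2 2)

lemma pvFloordiv_two (a : Int) : PySem.Int.floordiv a 2 = a / 2 :=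
  PySem.Int.floordiv_eq_ediv_of_pos (by omega)

lemma pvG_cons_zero (r : Int) (t : List String) : pvG r ("0" :: t) = pvG (r + 1) t := by
  simp [pvG, pvBStep]

lemma pvG_cons_barrier (r : Int) (x : String) (hx : x ≠ "0") (t : List String) :
    pvG r (x :: t) = (if x = "1" then 1 else 0) + PySem.Int.floordiv (max (r - 1) 0) 2 + pvG 0 t := by
  simp only [pvG, List.foldl_cons, pvBStep, if_neg hx, List.count_cons]
  have h := pvBFold_add t (PySem.Int.floordiv (max (r - 1) 0) 2) 0 0
  rw [show ((0 : Int) + PySem.Int.floordiv (max (r - 1) 0) 2)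
        = PySem.Int.floordiv (max (r - 1) 0) 2 + 0 by ring, h]
  by_cases hx1 : x = "1" <;> simp [hx1] <;> push_cast <;> ring

-- The joint invariant relating pvCnt's processed-neighbour state to B's run counter.
lemma pvMain : ∀ (l : List String),
    (∀ r : Int, 0 ≤ r → r % 2 = 1 → pvCnt "0" l = pvG r l - (r - 1) / 2)
    ∧ (∀ b : String, b ≠ "0" → pvCnt b l = pvG 0 l)
    ∧ (∀ r : Int, 2 ≤ r → r % 2 = 0 → (l = [] ∨ l.head? = some "0") →
        pvCnt "1" l = pvG r l - r / 2)
    ∧ (∀ r : Int, 2 ≤ r → r % 2 = 0 → l ≠ [] → l.head? ≠ some "0" →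
        pvCnt "0" l = pvG r l - (r - 2) / 2) := by
  intro l
  induction l with
  | nil =>
    refine ⟨?_, ?_, ?_, ?_⟩
    · intro r hr hodd
      simp only [pvCnt, pvG, List.foldl_nil, List.count_nil, pvFloordiv_two]
      omega
    · intro b hb
      simp only [pvCnt, pvG, List.foldl_nil, List.count_nil, pvFloordiv_two]
      omega
    · intro r hr heven _
      simp only [pvCnt, pvG, List.foldl_nil, List.count_nil, pvFloordiv_two]
      omega
    · intro r _ _ habs _
      exact absurd rfl habs
  | cons x t ih =>
    obtain ⟨ih1, ih2, ih3, ih4⟩ := ih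
    refine ⟨?_, ?_, ?_, ?_⟩
    · -- prev = "0", r odd ≥ 1
      intro r hr hodd
      rw [pvCnt_cons]
      by_cases hx : x = "0"
      · subst hx
        rw [pvG_cons_zero]
        by_cases hh : t.headD "0" = "0"
        · rw [if_pos ⟨rfl, rfl, hh⟩]
          have hht : t = [] ∨ t.head? = some "0" := by
            cases t with
            | nil => exact Or.inl rfl
            | cons a b => right; simpa using hh
          rw [ih3 (r + 1) (by omega) (by omega) hht]
          omega
        · have htne : t ≠ [] := by intro hnil; rw [hnil] at hh; simp at hh
          have hhne : t.head? ≠ some "0" := by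
            cases t with
            | nil => simp at htne
            | cons a b => simpa using hh
          rw [if_neg (by intro hcc; exact hh hcc.2.2)]
          rw [if_neg (show ¬ ("0" : String) = "1" by decide)]
          rw [ih4 (r + 1) (by omega) (by omega) htne hhne]
          omega
      · rw [if_neg (by intro hcc; exact hx hcc.2.1)]
        rw [ih2 x hx, pvG_cons_barrier r x hx]
        rw [show max (r - 1) 0 = r - 1 by omega, pvFloordiv_two]
        by_cases hx1 : x = "1" <;> simp [hx1] <;> omega
    · -- prev = b ≠ "0", r = 0
      intro b hb
      rw [pvCnt_cons]
      by_cases hx : x = "0"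
      · subst hx
        rw [if_neg (by intro hcc; exact hb hcc.1)]
        rw [if_neg (show ¬ ("0" : String) = "1" by decide)]
        rw [ih1 1 (by omega) (by omega), pvG_cons_zero]
        norm_num
      · rw [if_neg (by intro hcc; exact hb hcc.1)]
        rw [ih2 x hx, pvG_cons_barrier 0 x hx]
        rw [show max ((0 : Int) - 1) 0 = 0 by omega, pvFloordiv_two]
        split <;> omega
    · -- prev = "1", r even ≥ 2, head (if any) is "0"
      intro r hr heven hhead
      have hx : x = "0" := by
        rcases hhead with h | h
        · simp at h
        · simpa using h
      subst hx
      rw [pvCnt_cons]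
      rw [if_neg (by intro hcc; exact absurd hcc.1 (by decide))]
      rw [if_neg (show ¬ ("0" : String) = "1" by decide)]
      rw [ih1 (r + 1) (by omega) (by omega), pvG_cons_zero]
      omega
    · -- prev = "0", r even ≥ 2, current element a barrier
      intro r hr heven _ hhne
      have hx : x ≠ "0" := by intro h; exact hhne (by simp [h])
      rw [pvCnt_cons]
      rw [if_neg (by intro hcc; exact hx hcc.2.1)]
      rw [ih2 x hx, pvG_cons_barrier r x hx]
      rw [show max (r - 1) 0 = r - 1 by omega, pvFloordiv_two]
      split <;> omega

lemma pvB_eq_G (l : List String) : max_solar_bulbs_sliding_window_alt l = pvG 1 l := by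
  simp only [max_solar_bulbs_sliding_window_alt, pvG, PySem.List.count_eq]
  have h := pvBFold_add l ((List.count "1" l : Int)) 0 1
  simp only [add_zero] at h
  rw [h]
  ring

lemma pvSlice_tail_dropLast (x : String) (s : List String) :
    PySem.List.slice (x :: s) (some 1) (some (-1)) = s.dropLast := by
  simp [PySem.List.slice, PySem.List.clampIdx, List.dropLast_eq_take]
  split <;> omega

lemma pvA_eq_cnt (l : List String) : max_solar_bulbs_sliding_window l = pvCnt "0" l := by
  simp only [max_solar_bulbs_sliding_window]
  have hne : (["0"] : List String) ≠ [] := by simp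
  have hfold := pvFold_eq_scan l ["0"] hne
  simp only [List.length_singleton, Nat.cast_one] at hfold
  have hbound : ((((["0"] : List String) ++ l ++ ["0"]).length : Int) - 1)
      = (1 : Int) + (l.length : Int) := by
    simp only [List.length_append, List.length_singleton]
    push_cast
    ring
  rw [hbound, hfold]
  have hgl : (["0"] : List String).getLast hne = "0" := rfl
  rw [hgl, show (["0"] : List String) ++ pvScan "0" (l ++ ["0"]) = "0" :: pvScan "0" (l ++ ["0"]) by simp]
  rw [pvSlice_tail_dropLast, PySem.List.count_eq, pvCnt_eq_count_scan l "0"]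

-- ===== VERDICT (by name: the statement is the Claim_ definition above) =====
theorem max_solar_bulbs_sliding_window_spec : Claim_equal_max_solar_bulbs_sliding_window := by
  intro l _
  unfold Spec_max_solar_bulbs_sliding_window
  rw [pvA_eq_cnt, pvB_eq_G]
  have h := (pvMain l).1 1 (by omega) (by omega)
  omega
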